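-- pv_equiv track=rewrite | github.com/unbiarirang/Fixed-Input-Parameterization | utils.py | accumulate_possible_masks
-- ===== SOURCE A (Python) =====
-- def accumulate_possible_masks(possible_masks):
--     possible_span_lengths = [0] * len(possible_masks)
--     for i in range(len(possible_masks)):
--         if possible_masks[i] == 0:
--             continue
--         accumulation = 1
--         for j in range(1, len(possible_masks) - i):
--             if possible_masks[i + j] == 1:
--                 accumulation += 1
--             else:
--                 break
--         possible_span_lengths[i] = accumulation
--     return possible_span_lengths
-- ===== SOURCE B (Python) =====
-- def accumulate_possible_masks(possible_masks):
--     # Right-to-left single pass: O(n) instead of A's O(n^2) nested scan.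
--     n = len(possible_masks)
--     out = [0] * n
--     run = 0  # length of the run of consecutive 1s starting just after position i
--     for i in range(n - 1, -1, -1):
--         m = possible_masks[i]
--         if m != 0:
--             out[i] = run + 1
--         run = run + 1 if m == 1 else 0
--     return out
-- ===== Notes on version B (the rewrite author's own statement) =====
-- stated objective: faster
-- what changed: Replaces A's per-index inner scan of the following 1-run by a single right-to-left pass that carries the current run length of consecutive 1s, making the whole computation one pass.
import Mathlib
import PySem

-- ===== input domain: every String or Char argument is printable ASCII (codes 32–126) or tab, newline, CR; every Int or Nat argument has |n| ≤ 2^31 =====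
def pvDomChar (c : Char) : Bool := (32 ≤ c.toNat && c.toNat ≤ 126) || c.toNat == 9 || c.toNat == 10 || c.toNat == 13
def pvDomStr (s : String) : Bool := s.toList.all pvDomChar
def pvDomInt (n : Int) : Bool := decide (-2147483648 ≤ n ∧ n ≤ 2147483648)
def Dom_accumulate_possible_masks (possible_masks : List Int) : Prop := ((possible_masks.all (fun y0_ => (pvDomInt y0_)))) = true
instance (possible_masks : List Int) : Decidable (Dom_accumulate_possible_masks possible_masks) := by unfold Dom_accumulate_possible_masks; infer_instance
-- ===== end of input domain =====

-- B replaces A's O(n^2) nested scan by one right-to-left pass carrying the current 1-run length.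

-- ===== PORT A =====
-- inner loop: 'for j in range(1, len - i): if masks[i+j] == 1: acc += 1 else: break'
-- (indices i+j are always in range when called from the outer loop, so pyGetD is exact there)
def pvInnerA (xs : List Int) (i : Int) : List Int → Int → Int
  | [], acc => acc
  | j :: js, acc =>
      if PySem.List.pyGetD xs (i + j) 0 = 1 then pvInnerA xs i js (acc + 1) else acc

-- one outer-loop iteration: 'if masks[i] == 0: continue … spans[i] = accumulation'
def pvStepA (xs : List Int) (spans : List Int) (i : Int) : List Int :=
  if PySem.List.pyGetD xs i 0 = 0 then spans
  else PySem.List.pySetD spans i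
        (pvInnerA xs i (PySem.List.pyRange 1 ((xs.length : Int) - i) 1) 1)

def accumulate_possible_masks (possible_masks : List Int) : List Int :=
  (PySem.List.pyRange 0 (possible_masks.length : Int) 1).foldl
    (pvStepA possible_masks) (List.replicate possible_masks.length 0)

-- ===== PORT B =====
-- right-to-left pass: returns (out, run) where run = length of the run of 1s at the front
def pvGoB : List Int → List Int × Int
  | [] => ([], 0)
  | m :: rest =>
      let p := pvGoB rest
      ((if m ≠ 0 then p.2 + 1 else 0) :: p.1, if m = 1 then p.2 + 1 else 0)

def accumulate_possible_masks_alt (possible_masks : List Int) : List Int :=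
  (pvGoB possible_masks).1

-- ===== PRECONDITION & SPEC =====
def Spec_accumulate_possible_masks (possible_masks : List Int) (out : List Int) : Prop := out = accumulate_possible_masks_alt possible_masks
instance (possible_masks : List Int) (out : List Int) : Decidable (Spec_accumulate_possible_masks possible_masks out) := by unfold Spec_accumulate_possible_masks; infer_instance

-- ===== CLAIM (what is proved, stated in full; the proofs are below) =====
def Claim_equal_accumulate_possible_masks : Prop := ∀ (possible_masks : List Int), Dom_accumulate_possible_masks possible_masks → Spec_accumulate_possible_masks possible_masks (accumulate_possible_masks possible_masks)

-- ===== LEMMAS AND PROOFS =====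

theorem goB_length (xs : List Int) : (pvGoB xs).1.length = xs.length := by
  induction xs with
  | nil => rfl
  | cons m rest ih => simp [pvGoB, ih]

-- B's output, elementwise
theorem goB_getElem? (xs : List Int) (k : Nat) (hk : k < xs.length) :
    (pvGoB xs).1[k]? =
      some (if xs[k] ≠ 0 then (pvGoB (xs.drop (k + 1))).2 + 1 else 0) := by
  induction xs generalizing k with
  | nil => simp at hk
  | cons m rest ih =>
      cases k with
      | zero => simp [pvGoB]
      | succ k =>
          simp only [pvGoB, List.getElem?_cons_succ, List.getElem_cons_succ, List.drop_succ_cons]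
          exact ih k (by simpa using hk)

-- A's inner loop counts the run of 1s starting at position i+j
theorem innerA_eq (xs : List Int) (i : Int) :
    ∀ (d : Nat) (j acc : Int), 0 ≤ i → 0 < j →
    ((xs.length : Int) - i - j).toNat = d →
    pvInnerA xs i (PySem.List.pyRange j ((xs.length : Int) - i) 1) acc
      = acc + (pvGoB (xs.drop (i + j).toNat)).2 := by
  intro d
  induction d with
  | zero =>
      intro j acc hi hj hd
      rw [PySem.List.pyRange_one_eq_nil (by omega)]
      have hle : xs.length ≤ (i + j).toNat := by omega
      rw [List.drop_eq_nil_of_le hle]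
      simp [pvInnerA, pvGoB]
  | succ d ih =>
      intro j acc hi hj hd
      have hlt : j < (xs.length : Int) - i := by omega
      rw [PySem.List.pyRange_one_cons hlt]
      have hidx : (i + j).toNat < xs.length := by omega
      have hget : PySem.List.pyGetD xs (i + j) 0 = xs[(i + j).toNat] :=
        PySem.List.pyGetD_eq_getElem xs 0 (by omega) (by omega)
      have hdrop : xs.drop (i + j).toNat = xs[(i + j).toNat] :: xs.drop ((i + j).toNat + 1) :=
        List.drop_eq_getElem_cons hidx
      rw [hdrop]
      have hstep := ih (j + 1) (acc + 1) hi (by omega) (by omega)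
      have hnat : (i + (j + 1)).toNat = (i + j).toNat + 1 := by omega
      rw [hnat] at hstep
      by_cases h1 : xs[(i + j).toNat] = 1
      · have hone : pvInnerA xs i (j :: PySem.List.pyRange (j + 1) ((xs.length : Int) - i) 1) acc
            = pvInnerA xs i (PySem.List.pyRange (j + 1) ((xs.length : Int) - i) 1) (acc + 1) := by
          simp [pvInnerA, hget, h1]
        rw [hone, hstep]
        simp [pvGoB, h1]
        ring
      · simp only [pvInnerA, hget]
        rw [if_neg h1]
        simp [pvGoB, h1]

theorem stepA_length (xs spans : List Int) (a : Int) :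
    (pvStepA xs spans a).length = spans.length := by
  unfold pvStepA
  split
  · rfl
  · exact PySem.List.length_pySetD spans a _

theorem foldA_length (xs : List Int) (l : List Int) :
    ∀ spans : List Int, (l.foldl (pvStepA xs) spans).length = spans.length := by
  induction l with
  | nil => intro spans; rfl
  | cons a rest ih =>
      intro spans
      rw [List.foldl_cons, ih, stepA_length]

-- A's outer fold, elementwise
theorem foldA_getElem? (xs : List Int) :
    ∀ (d : Nat) (a : Int) (spans : List Int), 0 ≤ a → spans.length = xs.length →
    ((xs.length : Int) - a).toNat = d →
    ∀ (k : Nat) (hk : k < xs.length),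
    ((PySem.List.pyRange a (xs.length : Int) 1).foldl (pvStepA xs) spans)[k]? =
      if a ≤ (k : Int) ∧ xs[k] ≠ 0 then
        some (pvInnerA xs (k : Int)
          (PySem.List.pyRange 1 ((xs.length : Int) - (k : Int)) 1) 1)
      else spans[k]? := by
  intro d
  induction d with
  | zero =>
      intro a spans ha hlen hd k hk
      rw [PySem.List.pyRange_one_eq_nil (by omega)]
      have hno : ¬ (a ≤ (k : Int) ∧ xs[k] ≠ 0) := by
        intro ⟨h1, _⟩; omega
      simp [hno]
  | succ d ih =>
      intro a spans ha hlen hd k hk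
      have hlt : a < (xs.length : Int) := by omega
      rw [PySem.List.pyRange_one_cons hlt]
      simp only [List.foldl_cons]
      have hlen' : (pvStepA xs spans a).length = xs.length := by
        rw [stepA_length]; exact hlen
      rw [ih (a + 1) (pvStepA xs spans a) (by omega) hlen' (by omega) k hk]
      have hga : PySem.List.pyGetD xs a 0 = xs[a.toNat] :=
        PySem.List.pyGetD_eq_getElem xs 0 ha (by omega)
      by_cases hak : (k : Int) = a
      · -- this is the index the step writes (or skips)
        have hka : k = a.toNat := by omega
        subst hka
        rw [if_neg (by intro ⟨h1, _⟩; omega : ¬ (a + 1 ≤ ((a.toNat : Nat) : Int) ∧ xs[a.toNat] ≠ 0))]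
        unfold pvStepA
        by_cases h0 : xs[a.toNat] = 0
        · rw [if_pos (hga.trans h0)]
          rw [if_neg (by simp [h0])]
        · rw [if_neg (fun hh => h0 (hga.symm.trans hh))]
          rw [PySem.List.pySetD_of_nonneg _ _ ha]
          rw [List.getElem?_set_self (by omega)]
          rw [if_pos ⟨by omega, h0⟩, hak]
      · -- untouched index
        have heq : (pvStepA xs spans a)[k]? = spans[k]? := by
          unfold pvStepA
          split
          · rfl
          · rw [PySem.List.pySetD_of_nonneg _ _ ha]
            exact List.getElem?_set_ne (by omega)
        rw [heq]
        by_cases hcase : a ≤ (k : Int)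
        · have h2 : a + 1 ≤ (k : Int) := by omega
          by_cases h0 : xs[k] ≠ 0 <;> simp [h2, hcase, h0]
        · have h2 : ¬ (a + 1 ≤ (k : Int)) := by omega
          simp [h2, hcase]

-- ===== VERDICT (by name: the statement is the Claim_ definition above) =====
theorem accumulate_possible_masks_spec : Claim_equal_accumulate_possible_masks := by
  intro xs _
  unfold Spec_accumulate_possible_masks accumulate_possible_masks accumulate_possible_masks_alt
  apply List.ext_getElem?
  intro k
  by_cases hk : k < xs.length
  · rw [foldA_getElem? xs ((xs.length : Int) - 0).toNat 0 (List.replicate xs.length 0)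
        (by omega) (by simp) rfl k hk]
    rw [goB_getElem? xs k hk]
    by_cases h0 : xs[k] ≠ 0
    · rw [if_pos ⟨by omega, h0⟩]
      rw [innerA_eq xs (k : Int) ((xs.length : Int) - (k : Int) - 1).toNat 1 1
          (by omega) (by omega) rfl]
      have hnat : ((k : Int) + 1).toNat = k + 1 := by omega
      rw [hnat, if_pos h0]
      congr 1
      ring
    · rw [if_neg (by intro ⟨_, h⟩; exact h0 h)]
      simp only [ne_eq, not_not] at h0
      rw [if_neg (by simp [h0])]
      simp [hk]
  · rw [List.getElem?_eq_none (by rw [foldA_length]; simp; omega),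
        List.getElem?_eq_none (by rw [goB_length]; omega)]
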